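-- pv_equiv track=rewrite | github.com/AmuroPeng/CodingForInterview | leetcode-weekly-contest/Weekly Contest 187/03/solution.py | peopleIndexes
-- ===== SOURCE A (Python) =====
-- def peopleIndexes(favoriteCompanies):
--     """
--     :type favoriteCompanies: List[List[str]]
--     :rtype: List[int]
--     """
--     ansll = []
--     for i in range(len(favoriteCompanies)):
--         set1 = set(favoriteCompanies[i])
--         flag = 1
--         for j in range(len(favoriteCompanies)):
--             set2 = set(favoriteCompanies[j])
--             comm = set1.intersection(set2)
--             if (comm == set1 and i != j):
--                 flag = 0
--         if (flag):
--             ansll.append(i)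
--     return ansll
-- ===== SOURCE B (Python) =====
-- def peopleIndexes(favoriteCompanies):
--     # Inverted index: company -> set of indices whose list contains it.
--     posting = {}
--     for i, fav in enumerate(favoriteCompanies):
--         for c in fav:
--             posting.setdefault(c, set()).add(i)
--     n = len(favoriteCompanies)
--     ans = []
--     for i, fav in enumerate(favoriteCompanies):
--         supersets = set(range(n))
--         for c in fav:
--             supersets &= posting[c]
--         if len(supersets) == 1:  # only i itself is a superset
--             ans.append(i)
--     return ans
-- ===== Notes on version B (the rewrite author's own statement) =====
-- stated objective: faster
-- what changed: Replaces the all-pairs subset test (rebuilding both sets for every (i,j) pair) with an inverted index company->posting set built once; each index i is kept iff intersecting the posting sets of its companies (seeded with all indices) leaves only i itself.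
import Mathlib
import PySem

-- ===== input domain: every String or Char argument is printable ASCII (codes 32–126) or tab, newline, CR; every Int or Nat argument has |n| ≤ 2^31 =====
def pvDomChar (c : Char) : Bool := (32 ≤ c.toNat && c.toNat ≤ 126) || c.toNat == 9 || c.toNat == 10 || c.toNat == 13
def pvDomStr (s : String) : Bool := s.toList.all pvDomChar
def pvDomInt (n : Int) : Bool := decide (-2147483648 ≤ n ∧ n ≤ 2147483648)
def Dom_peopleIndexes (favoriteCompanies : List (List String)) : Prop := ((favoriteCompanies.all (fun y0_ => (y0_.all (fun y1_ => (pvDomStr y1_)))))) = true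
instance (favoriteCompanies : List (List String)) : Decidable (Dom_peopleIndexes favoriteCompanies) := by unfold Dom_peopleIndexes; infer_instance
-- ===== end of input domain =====

-- B replaces A's all-pairs subset test with an inverted index (company -> posting set of
-- indices); i is kept iff intersecting the posting sets of its companies leaves only i.

-- ===== PORT A =====
def peopleIndexes (favoriteCompanies : List (List String)) : List Int :=
  (PySem.List.pyRange 0 favoriteCompanies.length 1).foldl (fun ansll i =>
    let set1 : PySem.Set String := PySem.Set.ofList (PySem.List.pyGetD favoriteCompanies i [])
    let flag : Int := (PySem.List.pyRange 0 favoriteCompanies.length 1).foldl (fun flag j =>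
      let set2 : PySem.Set String := PySem.Set.ofList (PySem.List.pyGetD favoriteCompanies j [])
      let comm : PySem.Set String := PySem.Set.inter set1 set2
      if PySem.Set.equal comm set1 && !(i == j) then 0 else flag) 1
    if flag ≠ 0 then ansll ++ [i] else ansll) []

-- ===== PORT B =====
def peopleIndexes_alt (favoriteCompanies : List (List String)) : List Int :=
  let posting : PySem.Dict String (PySem.Set Int) :=
    (PySem.List.enumerate favoriteCompanies).foldl (fun d p =>
      p.2.foldl (fun d c => d.modify c [] (fun s => PySem.Set.add s p.1)) d) PySem.Dict.empty
  let n : Int := favoriteCompanies.length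
  (PySem.List.enumerate favoriteCompanies).foldl (fun ans p =>
    let supersets : PySem.Set Int := p.2.foldl (fun ss c => PySem.Set.inter ss (posting.getD c []))
        (PySem.Set.ofList (PySem.List.pyRange 0 n 1))
    if PySem.Set.len supersets == 1 then ans ++ [p.1] else ans) []

-- ===== PRECONDITION & SPEC =====
def Spec_peopleIndexes (favoriteCompanies : List (List String)) (out : List Int) : Prop := out = peopleIndexes_alt favoriteCompanies
instance (favoriteCompanies : List (List String)) (out : List Int) : Decidable (Spec_peopleIndexes favoriteCompanies out) := by unfold Spec_peopleIndexes; infer_instance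

-- ===== CLAIM (what is proved, stated in full; the proofs are below) =====
def Claim_equal_peopleIndexes : Prop := ∀ (favoriteCompanies : List (List String)), Dom_peopleIndexes favoriteCompanies → Spec_peopleIndexes favoriteCompanies (peopleIndexes favoriteCompanies)

-- ===== LEMMAS AND PROOFS =====

-- B's posting dictionary, named for the proofs (definitionally the let-bound fold in the port)
def postingOf (favoriteCompanies : List (List String)) : PySem.Dict String (PySem.Set Int) :=
  (PySem.List.enumerate favoriteCompanies).foldl (fun d p =>
    p.2.foldl (fun d c => d.modify c [] (fun s => PySem.Set.add s p.1)) d) PySem.Dict.empty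

-- membership in a posting set after the inner (one list) loop
theorem mem_inner_posting (cs : List String) (i : Int) (d : PySem.Dict String (PySem.Set Int))
    (c' : String) (j : Int) :
    j ∈ (cs.foldl (fun d c => d.modify c [] (fun s => PySem.Set.add s i)) d).getD c' [] ↔
      j ∈ d.getD c' [] ∨ (c' ∈ cs ∧ j = i) := by
  induction cs generalizing d with
  | nil => simp
  | cons c t ih =>
    simp only [List.foldl_cons, ih, PySem.Dict.getD_modify, List.mem_cons]
    by_cases h : c' = c
    · subst h; simp [PySem.Set.mem_add]; tauto
    · simp [h]

-- membership in a posting set after the whole build loop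
theorem mem_posting (l : List (Int × List String)) (d : PySem.Dict String (PySem.Set Int))
    (c : String) (j : Int) :
    j ∈ (l.foldl (fun d p => p.2.foldl (fun d c => d.modify c [] (fun s => PySem.Set.add s p.1)) d) d).getD c [] ↔
      j ∈ d.getD c [] ∨ ∃ p ∈ l, c ∈ p.2 ∧ j = p.1 := by
  induction l generalizing d with
  | nil => simp
  | cons p t ih =>
    simp only [List.foldl_cons, ih, mem_inner_posting, List.mem_cons]
    constructor
    · rintro ((h | ⟨hc, hj⟩) | ⟨q, hq, hc, hj⟩)
      · exact .inl h
      · exact .inr ⟨p, .inl rfl, hc, hj⟩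
      · exact .inr ⟨q, .inr hq, hc, hj⟩
    · rintro (h | ⟨q, (rfl | hq), hc, hj⟩)
      · exact .inl (.inl h)
      · exact .inl (.inr ⟨hc, hj⟩)
      · exact .inr ⟨q, hq, hc, hj⟩

theorem mem_postingOf (favoriteCompanies : List (List String)) (c : String) (j : Int) :
    j ∈ (postingOf favoriteCompanies).getD c [] ↔
      ∃ (k : Nat), ∃ (h : k < favoriteCompanies.length), c ∈ favoriteCompanies[k] ∧ j = (k : Int) := by
  rw [postingOf, mem_posting]
  simp only [PySem.Dict.getD_empty, List.not_mem_nil, false_or]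
  constructor
  · rintro ⟨p, hp, hc, hj⟩
    rw [PySem.List.mem_enumerate_iff] at hp
    obtain ⟨k, hk, rfl⟩ := hp
    exact ⟨k, hk, by simpa using hc, by simpa using hj⟩
  · rintro ⟨k, hk, hc, rfl⟩
    exact ⟨((k : Int), favoriteCompanies[k]), by
      rw [PySem.List.mem_enumerate_iff]; exact ⟨k, hk, by simp⟩, hc, rfl⟩

-- the intersection chain
theorem mem_inter_foldl (cs : List String) (g : String → PySem.Set Int) (init : PySem.Set Int) (j : Int) :
    j ∈ cs.foldl (fun ss c => PySem.Set.inter ss (g c)) init ↔ j ∈ init ∧ ∀ c ∈ cs, j ∈ g c := by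
  induction cs generalizing init with
  | nil => simp
  | cons c t ih => simp [ih, PySem.Set.mem_inter]; tauto

theorem nodup_inter_foldl (cs : List String) (g : String → PySem.Set Int) (init : PySem.Set Int)
    (h : init.Nodup) : (cs.foldl (fun ss c => PySem.Set.inter ss (g c)) init).Nodup := by
  induction cs generalizing init with
  | nil => exact h
  | cons c t ih => exact ih _ (PySem.Set.nodup_inter _ _ h)

-- A's flag loop: 1 survives iff no j triggers the reset
theorem flag_foldl (l : List Int) (p : Int → Bool) (a : Int) :
    l.foldl (fun acc j => if p j then (0 : Int) else acc) a = if l.any p then 0 else a := by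
  induction l generalizing a with
  | nil => simp
  | cons x t ih =>
    by_cases h : p x <;> simp [h, ih]

-- a Nodup set containing i has length 1 iff every member is i
theorem len_one_iff (s : PySem.Set Int) (i : Int) (hnd : s.Nodup) (hi : i ∈ s) :
    PySem.Set.len s = 1 ↔ ∀ j ∈ s, j = i := by
  constructor
  · intro h j hj
    match s, hj, hi with
    | [x], hj, hi => simp_all
    | x :: y :: t, _, _ => simp [PySem.Set.len] at h; omega
  · intro h
    have : s = [i] := by
      match s with
      | [x] => simp [h x (by simp)]
      | [] => simp at hi
      | x :: y :: t =>
        have hx := h x (by simp); have hy := h y (by simp)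
        subst hx; rw [hy] at hnd; simp at hnd
    simp [this, PySem.Set.len]

-- B's supersets chain for one favourite list, named for the proofs
def supersOf (favoriteCompanies : List (List String)) (cs : List String) : PySem.Set Int :=
  cs.foldl (fun ss c => PySem.Set.inter ss ((postingOf favoriteCompanies).getD c []))
    (PySem.Set.ofList (PySem.List.pyRange 0 favoriteCompanies.length 1))

theorem nodup_supersOf (fav : List (List String)) (cs : List String) : (supersOf fav cs).Nodup :=
  nodup_inter_foldl _ _ _ (PySem.Set.nodup_ofList _)

theorem alt_eq (fav : List (List String)) :
    peopleIndexes_alt fav = (PySem.List.pyRange 0 fav.length 1).foldl (fun ans j =>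
      if PySem.Set.len (supersOf fav (PySem.List.pyGetD fav j [])) == 1 then ans ++ [j] else ans) [] := by
  simp only [peopleIndexes_alt]
  rw [PySem.List.enumerate_eq_map_pyRange (d := []), List.foldl_map,
    ← PySem.List.enumerate_eq_map_pyRange (d := [])]
  simp [supersOf, postingOf]

theorem mem_supersOf (fav : List (List String)) (cs : List String) (j : Int) :
    j ∈ supersOf fav cs ↔ (0 ≤ j ∧ j < fav.length) ∧ ∀ c ∈ cs, j ∈ (postingOf fav).getD c [] := by
  rw [supersOf, mem_inter_foldl]
  simp [PySem.Set.mem_ofList, PySem.List.mem_pyRange_one]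

-- the per-index agreement of the two tests
theorem test_agree (fav : List (List String)) (k : Nat) (hk : k < fav.length) :
    (¬ (PySem.List.pyRange 0 fav.length 1).any (fun j =>
        PySem.Set.equal (PySem.Set.inter (PySem.Set.ofList (PySem.List.pyGetD fav (k : Int) []))
            (PySem.Set.ofList (PySem.List.pyGetD fav j [])))
          (PySem.Set.ofList (PySem.List.pyGetD fav (k : Int) [])) && !((k : Int) == j)) = true) ↔
      PySem.Set.len (supersOf fav (PySem.List.pyGetD fav (k : Int) [])) = 1 := by
  have hget : PySem.List.pyGetD fav (k : Int) [] = fav[k] := by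
    simp [PySem.List.pyGetD_natCast, List.getD_eq_getElem?_getD, hk]
  have hmemi : (k : Int) ∈ supersOf fav (PySem.List.pyGetD fav (k : Int) []) := by
    rw [mem_supersOf]
    refine ⟨⟨by positivity, by exact_mod_cast hk⟩, fun c hc => ?_⟩
    rw [mem_postingOf]
    exact ⟨k, hk, by rwa [hget] at hc, rfl⟩
  rw [len_one_iff _ _ (nodup_supersOf fav _) hmemi]
  simp only [List.any_eq_true, not_exists, not_and, PySem.List.mem_pyRange_one]
  constructor
  · -- no other superset → every member of the chain is k
    intro h j hj
    rw [mem_supersOf] at hj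
    obtain ⟨⟨hj0, hjn⟩, hall⟩ := hj
    obtain ⟨m, rfl⟩ : ∃ m : Nat, j = (m : Int) := ⟨j.toNat, (Int.toNat_of_nonneg hj0).symm⟩
    by_contra hne
    have hm : m < fav.length := by exact_mod_cast hjn
    have hsub : ∀ c ∈ PySem.List.pyGetD fav (k : Int) [], c ∈ fav[m] := by
      intro c hc
      have := hall c hc
      rw [mem_postingOf] at this
      obtain ⟨k', hk', hc', he⟩ := this
      have : m = k' := by exact_mod_cast he
      subst this; exact hc'
    have hh := h (m : Int) ⟨by positivity, by exact_mod_cast hm⟩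
    rw [Bool.and_eq_true] at hh
    refine hh ⟨?_, ?_⟩
    · rw [PySem.Set.equal_iff]
      intro x
      simp only [PySem.Set.mem_inter, PySem.Set.mem_ofList]
      refine ⟨fun h => h.1, fun hx => ⟨hx, ?_⟩⟩
      rw [show PySem.List.pyGetD fav ((m : Nat) : Int) [] = fav[m] by
        simp [PySem.List.pyGetD_natCast, List.getD_eq_getElem?_getD, hm]]
      exact hsub x hx
    · simpa using fun h => hne (by exact_mod_cast h.symm)
  · -- every member is k → no other j is a superset
    intro h j hj hq
    rw [Bool.and_eq_true, PySem.Set.equal_iff] at hq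
    obtain ⟨heq, hne⟩ := hq
    have hne' : (k : Int) ≠ j := by simpa using hne
    apply hne'
    symm
    apply h
    rw [mem_supersOf]
    refine ⟨⟨hj.1, hj.2⟩, fun c hc => ?_⟩
    rw [mem_postingOf]
    obtain ⟨m, rfl⟩ : ∃ m : Nat, j = (m : Int) := ⟨j.toNat, (Int.toNat_of_nonneg hj.1).symm⟩
    have hm : m < fav.length := by exact_mod_cast hj.2
    refine ⟨m, hm, ?_, rfl⟩
    have h2 := (heq c).mpr (by simpa [PySem.Set.mem_ofList] using hc)
    simp only [PySem.Set.mem_inter, PySem.Set.mem_ofList] at h2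
    have h3 := h2.2
    rwa [show PySem.List.pyGetD fav ((m : Nat) : Int) [] = fav[m] by
      simp [PySem.List.pyGetD_natCast, List.getD_eq_getElem?_getD, hm]] at h3

-- ===== VERDICT (by name: the statement is the Claim_ definition above) =====
theorem peopleIndexes_spec : Claim_equal_peopleIndexes := by
  intro fav _
  unfold Spec_peopleIndexes
  rw [alt_eq]
  simp only [peopleIndexes]
  apply PySem.List.foldl_congr_mem
  intro acc i hi
  rw [PySem.List.mem_pyRange_one] at hi
  obtain ⟨m, rfl⟩ : ∃ m : Nat, i = (m : Int) := ⟨i.toNat, (Int.toNat_of_nonneg hi.1).symm⟩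
  have hm : m < fav.length := by exact_mod_cast hi.2
  rw [flag_foldl]
  have hag := test_agree fav m hm
  by_cases hany : (PySem.List.pyRange 0 fav.length 1).any (fun j =>
      PySem.Set.equal (PySem.Set.inter (PySem.Set.ofList (PySem.List.pyGetD fav (m : Int) []))
          (PySem.Set.ofList (PySem.List.pyGetD fav j [])))
        (PySem.Set.ofList (PySem.List.pyGetD fav (m : Int) [])) && !((m : Int) == j)) = true
  · have hlen : ¬ PySem.Set.len (supersOf fav (PySem.List.pyGetD fav (m : Int) [])) = 1 :=
      fun h1 => (hag.mpr h1) hany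
    rw [if_pos hany, if_neg (by simp : ¬ (0 : Int) ≠ 0), if_neg (by simpa using hlen)]
  · have hlen : PySem.Set.len (supersOf fav (PySem.List.pyGetD fav (m : Int) [])) = 1 := hag.mp hany
    rw [if_neg hany, if_pos (by norm_num : (1 : Int) ≠ 0), if_pos (by simpa using hlen)]
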